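-- pv_equiv track=rewrite | github.com/daurenteame-sketch/jarvis-tender-ai | backend/modules/notifications/telegram.py | _build_marketplace_lines
-- ===== SOURCE A (Python) =====
-- def _build_marketplace_lines(marketplace_links: list) -> str:
--     """Build a short marketplace links block for Telegram messages."""
--     if not marketplace_links:
--         return ""
--     country_groups: dict[str, list] = {"KZ": [], "RU": [], "CN": []}
--     for link in marketplace_links:
--         c = link.get("country", "CN")
--         if c in country_groups:
--             country_groups[c].append(link)
--
--     flags = {"KZ": "🇰🇿", "RU": "🇷🇺", "CN": "🇨🇳"}
--     lines = []
--     for country, links in country_groups.items():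
--         if not links:
--             continue
--         # show max 2 per country
--         for link in links[:2]:
--             platform = link.get("platform", "")
--             url = link.get("url", "")
--             is_product = link.get("type") == "product"
--             icon = "🟢" if is_product else "🔍"
--             lines.append(f"{flags[country]} [{platform}]({url}) {icon}")
--     return "\n".join(lines)
-- ===== SOURCE B (Python) =====
-- def _build_marketplace_lines(marketplace_links: list) -> str:
--     """Build a short marketplace links block for Telegram messages."""
--     if not marketplace_links:
--         return ""
--     lines = []
--     for country, flag in (("KZ", "\U0001F1F0\U0001F1FF"), ("RU", "\U0001F1F7\U0001F1FA"), ("CN", "\U0001F1E8\U0001F1F3")):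
--         picked = [l for l in marketplace_links if l.get("country", "CN") == country][:2]
--         for link in picked:
--             icon = "\U0001F7E2" if link.get("type") == "product" else "\U0001F50D"
--             lines.append(f"{flag} [{link.get('platform', '')}]({link.get('url', '')}) {icon}")
--     return "\n".join(lines)
-- ===== Notes on version B (the rewrite author's own statement) =====
-- stated objective: simpler
-- what changed: B drops the mutable country-groups dict entirely: it iterates the fixed (country, flag) pairs and for each one filters marketplace_links by its country (honoring the 'CN' default) and formats the first two matches, instead of building a grouping dict in one pass and then walking its items.
import Mathlib
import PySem

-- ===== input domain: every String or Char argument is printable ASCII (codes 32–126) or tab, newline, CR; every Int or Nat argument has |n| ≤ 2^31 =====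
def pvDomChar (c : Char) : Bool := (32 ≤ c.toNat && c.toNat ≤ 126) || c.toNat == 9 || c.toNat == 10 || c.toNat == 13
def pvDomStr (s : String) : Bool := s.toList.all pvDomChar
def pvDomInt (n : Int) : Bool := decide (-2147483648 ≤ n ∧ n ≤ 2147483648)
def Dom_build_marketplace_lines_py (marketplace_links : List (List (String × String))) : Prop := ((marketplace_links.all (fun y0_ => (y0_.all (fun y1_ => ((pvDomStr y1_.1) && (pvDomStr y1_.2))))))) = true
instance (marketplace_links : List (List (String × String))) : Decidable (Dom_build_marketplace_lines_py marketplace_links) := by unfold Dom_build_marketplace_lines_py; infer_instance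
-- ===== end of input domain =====

-- B replaces A's mutable grouping dict by per-country filters over the fixed (country, flag) list; same output, simpler decomposition.


-- ===== PORT A =====
-- link.get(k, dflt) on a Python dict argument (modelled as an assoc list)
def pvLinkGetD (link : List (String × String)) (k dflt : String) : String :=
  (PySem.Dict.mk link).getD k dflt

-- link.get(k) (no default → Option)
def pvLinkGet? (link : List (String × String)) (k : String) : Option String :=
  (PySem.Dict.mk link).get? k

-- A's grouping-loop body
def pvStepA (g : PySem.Dict String (List (List (String × String)))) (link : List (String × String)) :
    PySem.Dict String (List (List (String × String))) :=
  let c := pvLinkGetD link "country" "CN"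
  if g.contains c then g.modify c [] (fun ls => ls ++ [link]) else g

def build_marketplace_lines_py (marketplace_links : List (List (String × String))) : String :=
  if marketplace_links = [] then ""
  else
    let country_groups : PySem.Dict String (List (List (String × String))) :=
      PySem.Dict.mk [("KZ", []), ("RU", []), ("CN", [])]
    let country_groups := marketplace_links.foldl pvStepA country_groups
    let flags : PySem.Dict String String := PySem.Dict.mk [("KZ", "🇰🇿"), ("RU", "🇷🇺"), ("CN", "🇨🇳")]
    let lines := country_groups.items.foldl (fun lines p =>
        if p.2 = [] then lines
        else (PySem.List.slice p.2 none (some 2)).foldl (fun lines link =>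
            let platform := pvLinkGetD link "platform" ""
            let url := pvLinkGetD link "url" ""
            let is_product := pvLinkGet? link "type" == some "product"
            let icon := if is_product then "🟢" else "🔍"
            -- flags[country]: country is always a key of flags here, so getD is exact
            lines ++ [flags.getD p.1 "" ++ " [" ++ platform ++ "](" ++ url ++ ") " ++ icon]) lines)
      []
    PySem.Str.join "\n" lines

-- ===== PORT B =====
def pvFmtLine (flag : String) (link : List (String × String)) : String :=
  let icon := if pvLinkGet? link "type" == some "product" then "🟢" else "🔍"
  flag ++ " [" ++ pvLinkGetD link "platform" "" ++ "](" ++ pvLinkGetD link "url" "" ++ ") " ++ icon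

def build_marketplace_lines_py_alt (marketplace_links : List (List (String × String))) : String :=
  if marketplace_links = [] then ""
  else
    PySem.Str.join "\n"
      ([("KZ", "🇰🇿"), ("RU", "🇷🇺"), ("CN", "🇨🇳")].foldl (fun lines cf =>
        let picked := PySem.List.slice
          (marketplace_links.filter (fun l => pvLinkGetD l "country" "CN" == cf.1)) none (some 2)
        lines ++ picked.map (pvFmtLine cf.2)) [])

-- ===== PRECONDITION & SPEC =====
def Spec_build_marketplace_lines_py (marketplace_links : List (List (String × String))) (out : String) : Prop := out = build_marketplace_lines_py_alt marketplace_links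
instance (marketplace_links : List (List (String × String))) (out : String) : Decidable (Spec_build_marketplace_lines_py marketplace_links out) := by unfold Spec_build_marketplace_lines_py; infer_instance

-- ===== CLAIM (what is proved, stated in full; the proofs are below) =====
def Claim_equal_build_marketplace_lines_py : Prop := ∀ (marketplace_links : List (List (String × String))), Dom_build_marketplace_lines_py marketplace_links → Spec_build_marketplace_lines_py marketplace_links (build_marketplace_lines_py marketplace_links)

-- ===== LEMMAS AND PROOFS =====

-- A's grouping loop, started on the literal three-key dict, yields the per-country filters of B.
theorem foldA_groups (ml : List (List (String × String))) (a b c : List (List (String × String))) :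
    ml.foldl pvStepA (PySem.Dict.mk [("KZ", a), ("RU", b), ("CN", c)]) =
      PySem.Dict.mk
        [("KZ", a ++ ml.filter (fun l => pvLinkGetD l "country" "CN" == "KZ")),
         ("RU", b ++ ml.filter (fun l => pvLinkGetD l "country" "CN" == "RU")),
         ("CN", c ++ ml.filter (fun l => pvLinkGetD l "country" "CN" == "CN"))] := by
  induction ml generalizing a b c with
  | nil => simp
  | cons x xs ih =>
    simp only [List.foldl_cons, List.filter_cons]
    by_cases h1 : pvLinkGetD x "country" "CN" = "KZ"
    · simp [pvStepA, h1, PySem.Dict.modify, PySem.Dict.contains, PySem.Dict.get?,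
        PySem.Dict.getD, PySem.Dict.insert, ih]
    · by_cases h2 : pvLinkGetD x "country" "CN" = "RU"
      · simp [pvStepA, h2, PySem.Dict.modify, PySem.Dict.contains, PySem.Dict.get?,
          PySem.Dict.getD, PySem.Dict.insert, ih]
      · by_cases h3 : pvLinkGetD x "country" "CN" = "CN"
        · simp [pvStepA, h3, PySem.Dict.modify, PySem.Dict.contains, PySem.Dict.get?,
            PySem.Dict.getD, PySem.Dict.insert, ih]
        · simp [pvStepA, Ne.symm h1, Ne.symm h2, Ne.symm h3, PySem.Dict.contains, ih]
          exact ⟨h1, h2, h3⟩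

-- One country block of A's output loop (append a formatted line per kept link, skipping
-- empty groups) equals appending the mapped block B builds.
theorem block_eq (g : List (List (String × String))) (flag : String) (lines : List String) :
    (if g = [] then lines
     else (PySem.List.slice g none (some 2)).foldl (fun lines link =>
        lines ++ [flag ++ " [" ++ pvLinkGetD link "platform" "" ++ "](" ++ pvLinkGetD link "url" "" ++ ") " ++
          (if (pvLinkGet? link "type" == some "product") = true then "🟢" else "🔍")]) lines)
      = lines ++ (PySem.List.slice g none (some 2)).map (pvFmtLine flag) := by
  by_cases hg : g = []
  · simp [hg, PySem.List.slice]
  · rw [if_neg hg, PySem.List.foldl_append_singleton_eq_map]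
    simp [pvFmtLine]

-- ===== VERDICT (by name: the statement is the Claim_ definition above) =====
theorem build_marketplace_lines_py_spec : Claim_equal_build_marketplace_lines_py := by
  intro ml _
  unfold Spec_build_marketplace_lines_py build_marketplace_lines_py build_marketplace_lines_py_alt
  by_cases h : ml = []
  · simp [h]
  · simp only [h, if_false, foldA_groups, List.nil_append]
    simp only [List.foldl_cons, List.foldl_nil]
    rw [block_eq, block_eq, block_eq]
    simp [PySem.Dict.getD, PySem.Dict.get?]
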